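-- pv_equiv track=rewrite | github.com/Cerebras/modelzoo | modelzoo/common/pytorch/run_utils.py | update_sideband_mode_arg
-- ===== SOURCE A (Python) =====
-- from typing import Any, Callable, Dict, List, Optional
--
-- def arg_filter(arg: str, keyword: str) -> bool:
--     """Checks if a given arg matches the given keyword"""
--     arg = arg.strip()
--     return (
--         arg.startswith(f"--{keyword}=")
--         or arg.startswith(f"-{keyword}=")
--         or arg == f"--{keyword}"
--         or arg == f"-{keyword}"
--     )
--
-- def update_sideband_mode_arg(
--     arguments: List[str], new_mode_arg: str, old_mode: str
-- ) -> List[str]: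
--     """Updates sideband arguments to a different mode"""
--     # filter out args with the name of the old mode provided they
--     # have "mode" or "m" preceding
--     offset_arguments = [None] + arguments
--     updated_args = [
--         an_arg
--         for an_arg, prev_arg in zip(arguments, offset_arguments)
--         if an_arg != old_mode
--         or not (arg_filter(prev_arg, "mode") or arg_filter(prev_arg, "m"))
--     ]
--
--     # filter and add the new mode
--     updated_args = [
--         new_mode_arg
--         if arg_filter(an_arg, "mode") or arg_filter(an_arg, "m")
--         else an_arg
--         for an_arg in updated_args
--     ]
--
--     return updated_args
-- ===== SOURCE B (Python) =====
-- def arg_filter(arg: str, keyword: str) -> bool: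
--     """Checks if a given arg matches the given keyword"""
--     arg = arg.strip()
--     return (
--         arg.startswith(f"--{keyword}=")
--         or arg.startswith(f"-{keyword}=")
--         or arg == f"--{keyword}"
--         or arg == f"-{keyword}"
--     )
--
-- def update_sideband_mode_arg(arguments, new_mode_arg, old_mode):
--     """Single pass: drop an old-mode value that follows a mode flag,
--     replace mode flags by the new mode arg, keep everything else."""
--     out = []
--     prev = None
--     for arg in arguments:
--         if arg == old_mode and prev is not None and (
--             arg_filter(prev, "mode") or arg_filter(prev, "m")
--         ):
--             pass  # drop the old mode value
--         elif arg_filter(arg, "mode") or arg_filter(arg, "m"):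
--             out.append(new_mode_arg)
--         else:
--             out.append(arg)
--         prev = arg
--     return out
-- ===== Notes on version B (the rewrite author's own statement) =====
-- stated objective: simpler
-- what changed: Replaced A's offset-list + zip + two list comprehensions (drop pass, then replace pass) by one explicit loop that tracks the previous original argument and decides drop/replace/keep per element; Pre_ excludes inputs whose first argument equals old_mode, where A raises AttributeError.
import Mathlib
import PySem

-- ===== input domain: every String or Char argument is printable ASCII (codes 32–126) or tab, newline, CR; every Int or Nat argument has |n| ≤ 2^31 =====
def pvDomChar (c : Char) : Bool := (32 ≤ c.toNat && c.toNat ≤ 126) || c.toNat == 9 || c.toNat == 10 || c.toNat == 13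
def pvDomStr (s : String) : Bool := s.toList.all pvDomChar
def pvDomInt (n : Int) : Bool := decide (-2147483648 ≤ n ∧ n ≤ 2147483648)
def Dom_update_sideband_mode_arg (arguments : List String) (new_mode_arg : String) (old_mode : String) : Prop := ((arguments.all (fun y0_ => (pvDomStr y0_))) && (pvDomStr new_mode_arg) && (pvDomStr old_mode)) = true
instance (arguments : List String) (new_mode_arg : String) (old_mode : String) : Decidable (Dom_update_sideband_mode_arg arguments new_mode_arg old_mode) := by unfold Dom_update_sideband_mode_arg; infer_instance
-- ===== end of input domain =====

-- B fuses A's offset-list+zip+two comprehensions into one loop tracking the previous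
-- original argument (objective: simpler); equivalence is about the return value.

-- ===== PORT A =====
-- arg_filter(arg, keyword)
def pvArgFilter (arg : String) (keyword : String) : Bool :=
  let a := PySem.Str.strip arg
  PySem.Str.startswith a ("--" ++ keyword ++ "=") ||
  PySem.Str.startswith a ("-" ++ keyword ++ "=") ||
  a == ("--" ++ keyword) || a == ("-" ++ keyword)

-- A calls arg_filter on prev_arg, which is None for the first pair; Python's
-- short-circuit never reaches it unless arguments[0] == old_mode (excluded by Pre_),
-- so the none case returning false is exact on Pre_.
def pvArgFilterOpt (arg : Option String) (keyword : String) : Bool :=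
  match arg with
  | none => false
  | some a => pvArgFilter a keyword

def update_sideband_mode_arg (arguments : List String) (new_mode_arg : String) (old_mode : String) : List String :=
  let offset_arguments : List (Option String) := none :: arguments.map some
  let updated_args :=
    ((arguments.zip offset_arguments).filter (fun pr =>
      pr.1 != old_mode ||
      !(pvArgFilterOpt pr.2 "mode" || pvArgFilterOpt pr.2 "m"))).map Prod.fst
  updated_args.map (fun an_arg =>
    if pvArgFilter an_arg "mode" || pvArgFilter an_arg "m" then new_mode_arg else an_arg)

-- ===== PORT B =====
-- 'prev is not None and (arg_filter(prev,"mode") or arg_filter(prev,"m"))'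
def pvPrevIsModeFlag (prev : Option String) : Bool :=
  match prev with
  | none => false
  | some p => pvArgFilter p "mode" || pvArgFilter p "m"

-- Source B's loop over arguments, carrying prev; appending to out = consing in recursion
def pvLoopB (new_mode_arg old_mode : String) : List String → Option String → List String
  | [], _ => []
  | arg :: rest, prev =>
    if arg == old_mode && pvPrevIsModeFlag prev then
      pvLoopB new_mode_arg old_mode rest (some arg)
    else if pvArgFilter arg "mode" || pvArgFilter arg "m" then
      new_mode_arg :: pvLoopB new_mode_arg old_mode rest (some arg)
    else
      arg :: pvLoopB new_mode_arg old_mode rest (some arg)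

def update_sideband_mode_arg_alt (arguments : List String) (new_mode_arg : String) (old_mode : String) : List String :=
  pvLoopB new_mode_arg old_mode arguments none

-- ===== PRECONDITION & SPEC =====
-- Pre_ excludes exactly the inputs where A raises AttributeError: a first argument
-- equal to old_mode makes A call arg_filter(None, ...).
def Pre_update_sideband_mode_arg (arguments : List String) (_new_mode_arg : String) (old_mode : String) : Prop :=
  arguments.head? ≠ some old_mode
instance (arguments : List String) (new_mode_arg : String) (old_mode : String) : Decidable (Pre_update_sideband_mode_arg arguments new_mode_arg old_mode) := by unfold Pre_update_sideband_mode_arg; infer_instance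

def pvWitness_update_sideband_mode_arg : List String × String × String :=
  (["--mode", "train", "x"], "--mode=eval", "train")

def Spec_update_sideband_mode_arg (arguments : List String) (new_mode_arg : String) (old_mode : String) (out : List String) : Prop := out = update_sideband_mode_arg_alt arguments new_mode_arg old_mode
instance (arguments : List String) (new_mode_arg : String) (old_mode : String) (out : List String) : Decidable (Spec_update_sideband_mode_arg arguments new_mode_arg old_mode out) := by unfold Spec_update_sideband_mode_arg; infer_instance

-- ===== CLAIM =====
def Claim_equal_update_sideband_mode_arg : Prop := ∀ (arguments : List String) (new_mode_arg : String) (old_mode : String), Dom_update_sideband_mode_arg arguments new_mode_arg old_mode → Pre_update_sideband_mode_arg arguments new_mode_arg old_mode → Spec_update_sideband_mode_arg arguments new_mode_arg old_mode (update_sideband_mode_arg arguments new_mode_arg old_mode)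

-- ===== LEMMAS AND PROOFS =====
-- B's loop equals A's filter-then-map, for any previous element.
theorem pvLoopB_eq (new_mode_arg old_mode : String) :
    ∀ (l : List String) (prev : Option String),
      pvLoopB new_mode_arg old_mode l prev =
      (((l.zip (prev :: l.map some)).filter (fun pr =>
          pr.1 != old_mode ||
          !(pvArgFilterOpt pr.2 "mode" || pvArgFilterOpt pr.2 "m"))).map Prod.fst).map
        (fun an_arg =>
          if pvArgFilter an_arg "mode" || pvArgFilter an_arg "m" then new_mode_arg else an_arg)
  | [], prev => rfl
  | arg :: rest, prev => by
    have ih := pvLoopB_eq new_mode_arg old_mode rest (some arg)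
    have hdrop : (arg == old_mode && pvPrevIsModeFlag prev) =
        !(arg != old_mode || !(pvArgFilterOpt prev "mode" || pvArgFilterOpt prev "m")) := by
      cases prev <;> simp [pvPrevIsModeFlag, pvArgFilterOpt, bne, Bool.not_not]
    cases hb : (arg == old_mode && pvPrevIsModeFlag prev) with
    | true =>
      have h : (arg != old_mode || !(pvArgFilterOpt prev "mode" || pvArgFilterOpt prev "m")) = false := by
        rw [hdrop] at hb; cases hx : (arg != old_mode || !(pvArgFilterOpt prev "mode" || pvArgFilterOpt prev "m")) <;> rw [hx] at hb <;> simp_all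
      simp only [pvLoopB, hb, if_true, List.map_cons, List.zip_cons_cons, List.filter_cons, h,
        Bool.false_eq_true, if_false, ih]
    | false =>
      have h : (arg != old_mode || !(pvArgFilterOpt prev "mode" || pvArgFilterOpt prev "m")) = true := by
        rw [hdrop] at hb; cases hx : (arg != old_mode || !(pvArgFilterOpt prev "mode" || pvArgFilterOpt prev "m")) <;> rw [hx] at hb <;> simp_all
      simp only [pvLoopB, hb, Bool.false_eq_true, if_false, List.map_cons, List.zip_cons_cons,
        List.filter_cons, h, if_true, ih]
      cases hf : (pvArgFilter arg "mode" || pvArgFilter arg "m") <;> simp [hf]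

-- ===== VERDICT =====
theorem update_sideband_mode_arg_spec : Claim_equal_update_sideband_mode_arg := by
  intro arguments new_mode_arg old_mode _ _
  unfold Spec_update_sideband_mode_arg update_sideband_mode_arg update_sideband_mode_arg_alt
  exact (pvLoopB_eq new_mode_arg old_mode arguments none).symm
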